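-- pv_equiv track=rewrite | github.com/redgreat/quecloc | jt808/jt808_core.py | BCC_Check
-- ===== SOURCE A (Python) =====
-- def BCC_Check(data):
--     data = data.replace(' ', '')
--     n = int(len(data) / 2)
--     xor = 0
--     for r in range(n):
--         xor ^= int(data[2 * r:2 * r + 2], 16)
--     xor = hex(xor)
--
--     if len(xor) != 4:
--         xor = '0' + xor[2:]
--     else:
--         xor = xor[2:]
--     return xor
-- ===== SOURCE B (Python) =====
-- def BCC_Check(data):
--     s = data.replace(' ', '')
--     m = len(s) - len(s) % 2
--     hi = lo = 0
--     for i, c in enumerate(s[:m]):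
--         v = int(c, 16)
--         if i % 2 == 0:
--             hi ^= v
--         else:
--             lo ^= v
--     return '%x%x' % (hi, lo)
-- ===== Notes on version B (the rewrite author's own statement) =====
-- stated objective: alternative
-- what changed: B never forms byte values: exploiting that XOR acts bitwise, it folds once over single characters with two independent nibble accumulators selected by index parity (hi for even positions, lo for odd) and prints the two nibbles directly as two hex digits, instead of A's loop that slices each two-char pair, parses it as a byte with int(pair,16), XORs bytes and then hand-edits the two-character prefix off hex().
-- outside the precondition, e.g. on BCC_Check('+5'): A returns '05', B raises ValueError; on BCC_Check('\tf'): A returns '0f', B raises ValueError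
import Mathlib
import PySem

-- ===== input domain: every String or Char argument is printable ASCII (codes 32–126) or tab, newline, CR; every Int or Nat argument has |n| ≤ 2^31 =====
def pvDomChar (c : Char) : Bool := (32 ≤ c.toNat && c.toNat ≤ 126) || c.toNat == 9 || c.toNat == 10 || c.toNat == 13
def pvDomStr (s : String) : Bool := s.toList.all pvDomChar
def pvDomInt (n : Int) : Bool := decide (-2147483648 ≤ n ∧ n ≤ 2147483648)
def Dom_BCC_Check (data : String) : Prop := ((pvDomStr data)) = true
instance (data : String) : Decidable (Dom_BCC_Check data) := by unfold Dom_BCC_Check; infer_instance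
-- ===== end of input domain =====

-- B replaces A's per-pair byte loop (slice two chars, int(pair,16), XOR the byte, then
-- hand-edit hex()'s string) by a per-CHARACTER parity fold keeping two independent nibble
-- accumulators (XOR acts bitwise, so the high and low nibbles never interact) and printing
-- each nibble directly; equal on Pre_ (no speed claim).

-- ===== PORT A =====

-- value of a single hex digit (as used by int(·,16) on hex-digit characters; 0 junk otherwise —
-- Pre_ guarantees only hex digits are parsed)
def pvHexDigitVal (c : Char) : Nat :=
  if 48 ≤ c.toNat ∧ c.toNat ≤ 57 then c.toNat - 48
  else if 97 ≤ c.toNat ∧ c.toNat ≤ 102 then c.toNat - 87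
  else if 65 ≤ c.toNat ∧ c.toNat ≤ 70 then c.toNat - 55
  else 0

-- int(s, 16): exact on nonempty strings of hex digits (the only strings it sees under Pre_)
def pvParseHex (l : List Char) : Nat := l.foldl (fun a c => 16 * a + pvHexDigitVal c) 0

def pvHexChar (n : Nat) : Char := if n < 10 then Char.ofNat (48 + n) else Char.ofNat (87 + n)

-- lowercase hex digits of x, no prefix: what follows the prefix of hex(x), and percent-x formatting
def pvHexRepr (x : Nat) : List Char :=
  if x < 16 then [pvHexChar x] else pvHexRepr (x / 16) ++ [pvHexChar (x % 16)]
decreasing_by exact Nat.div_lt_self (by omega) (by omega)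

def BCC_Check (data : String) : String :=
  let d := PySem.Chars.replace data.toList [' '] []
  let n : Nat := d.length / 2                               -- int(len(data)/2)
  let xor : Nat :=
    (List.range n).foldl
      (fun a r => a ^^^ pvParseHex (PySem.List.slice d (some ((2 * r : Nat) : Int)) (some ((2 * r + 2 : Nat) : Int)))) 0
  let h : List Char := '0' :: 'x' :: pvHexRepr xor          -- hex(xor)
  if h.length ≠ 4 then String.ofList ('0' :: h.drop 2) else String.ofList (h.drop 2)

-- ===== PORT B =====

def BCC_Check_alt (data : String) : String :=
  let s := PySem.Chars.replace data.toList [' '] []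
  let m : Nat := s.length - s.length % 2
  let p : Nat × Nat :=
    (PySem.List.enumerate (s.take m) 0).foldl               -- for i, c in enumerate(s[:m])
      (fun (st : Nat × Nat) ic =>
        let v := pvHexDigitVal ic.2                          -- v = int(c, 16)
        if PySem.Int.mod ic.1 2 == 0 then (st.1 ^^^ v, st.2) -- i % 2 == 0: hi ^= v
        else (st.1, st.2 ^^^ v))                             -- else: lo ^= v
      (0, 0)
  String.ofList (pvHexRepr p.1 ++ pvHexRepr p.2)             -- percent-x format of hi then lo

-- ===== PRECONDITION & SPEC =====

def pvIsHexDigit (c : Char) : Bool :=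
  (48 ≤ c.toNat && c.toNat ≤ 57) || (97 ≤ c.toNat && c.toNat ≤ 102) || (65 ≤ c.toNat && c.toNat ≤ 70)

-- Pre_ excludes inputs on which A raises ValueError (a non-hex character inside a parsed pair)
-- and the inputs where a parsed pair carries a sign or extra whitespace (e.g. '+5', '\tf'):
-- there A's int(pair,16) accepts the pair but B's per-character int(c,16) raises ValueError.
def Pre_BCC_Check (data : String) : Prop :=
  ((PySem.Chars.replace data.toList [' '] []).take
      (2 * ((PySem.Chars.replace data.toList [' '] []).length / 2))).all pvIsHexDigit = true

instance (data : String) : Decidable (Pre_BCC_Check data) := by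
  unfold Pre_BCC_Check; infer_instance

def pvWitness_BCC_Check : String := "1a 2B 03"

def Spec_BCC_Check (data : String) (out : String) : Prop := out = BCC_Check_alt data
instance (data : String) (out : String) : Decidable (Spec_BCC_Check data out) := by unfold Spec_BCC_Check; infer_instance

-- ===== CLAIM (what is proved, stated in full; the proofs are below) =====
def Claim_equal_BCC_Check : Prop := ∀ (data : String), Dom_BCC_Check data → Pre_BCC_Check data → Spec_BCC_Check data (BCC_Check data)

-- ===== LEMMAS AND PROOFS =====

-- the even-length byte list A's loop walks through (proof-side bridge between the two loops)
def pvToBytes : List Char → List Nat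
  | c0 :: c1 :: rest => (16 * pvHexDigitVal c0 + pvHexDigitVal c1) :: pvToBytes rest
  | _ => []

-- XOR of the even-position (resp. odd-position) nibbles
def pvXE : List Char → Nat
  | c0 :: _ :: rest => pvHexDigitVal c0 ^^^ pvXE rest
  | [c] => pvHexDigitVal c
  | [] => 0

def pvXO : List Char → Nat
  | _ :: c1 :: rest => pvHexDigitVal c1 ^^^ pvXO rest
  | _ => 0

theorem pvHexDigitVal_lt (c : Char) : pvHexDigitVal c < 16 := by
  unfold pvHexDigitVal; split_ifs <;> omega

theorem pvXE_lt (l : List Char) : pvXE l < 16 := by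
  induction l using pvXE.induct with
  | case1 c0 c1 rest ih =>
      rw [pvXE]
      exact Nat.xor_lt_two_pow (n := 4) (pvHexDigitVal_lt c0) ih
  | case2 c => rw [pvXE]; exact pvHexDigitVal_lt c
  | case3 => rw [pvXE]; omega

theorem pvXO_lt (l : List Char) : pvXO l < 16 := by
  induction l using pvXO.induct with
  | case1 c0 c1 rest ih =>
      rw [pvXO]
      exact Nat.xor_lt_two_pow (n := 4) (pvHexDigitVal_lt c1) ih
  | case2 l h => cases l with
      | nil =>
          rw [pvXO]
          · omega
          · exact h
      | cons c t => cases t with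
        | nil =>
          rw [pvXO]
          · omega
          · exact h
        | cons c1 t1 => exact absurd rfl (h c c1 t1)

-- the nibble-split identity: XOR on bytes acts independently on the two nibbles
theorem nibble_split (hi lo a b : Nat) (hlo : lo < 16) (hb : b < 16) :
    (16 * hi + lo) ^^^ (16 * a + b) = 16 * (hi ^^^ a) + (lo ^^^ b) := by
  have hdiv : ((16 * hi + lo) ^^^ (16 * a + b)) / 16 = hi ^^^ a := by
    have h := Nat.xor_div_two_pow (a := 16 * hi + lo) (b := 16 * a + b) (n := 4)
    have e1 : (16 * hi + lo) / 2 ^ 4 = hi := by omega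
    have e2 : (16 * a + b) / 2 ^ 4 = a := by omega
    rw [e1, e2] at h
    simpa using h
  have hmod : ((16 * hi + lo) ^^^ (16 * a + b)) % 16 = lo ^^^ b := by
    have h := Nat.xor_mod_two_pow (a := 16 * hi + lo) (b := 16 * a + b) (n := 4)
    have e1 : (16 * hi + lo) % 2 ^ 4 = lo := by omega
    have e2 : (16 * a + b) % 2 ^ 4 = b := by omega
    rw [e1, e2] at h
    simpa using h
  omega

-- A's index loop over pair slices equals an XOR fold over the byte list
theorem loop_eq (l : List Char) : ∀ acc : Nat,
    (List.range (l.length / 2)).foldl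
        (fun a r => a ^^^ pvParseHex (PySem.List.slice l (some ((2 * r : Nat) : Int)) (some ((2 * r + 2 : Nat) : Int)))) acc
      = (pvToBytes (l.take (l.length - l.length % 2))).foldl (· ^^^ ·) acc := by
  induction l using pvToBytes.induct with
  | case1 c0 c1 rest ih =>
    intro acc
    have hlen : (c0 :: c1 :: rest).length / 2 = rest.length / 2 + 1 := by
      simp only [List.length_cons]; omega
    have htake : (c0 :: c1 :: rest).length - (c0 :: c1 :: rest).length % 2
        = (rest.length - rest.length % 2) + 2 := by
      simp only [List.length_cons]; omega
    have hslice0 : PySem.List.slice (c0 :: c1 :: rest) (some ((2 * 0 : Nat) : Int)) (some ((2 * 0 + 2 : Nat) : Int))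
        = [c0, c1] := by
      rw [PySem.List.slice_natCast]; rfl
    have hshift : ∀ k : Nat,
        PySem.List.slice (c0 :: c1 :: rest) (some ((2 * (k + 1) : Nat) : Int)) (some ((2 * (k + 1) + 2 : Nat) : Int))
        = PySem.List.slice rest (some ((2 * k : Nat) : Int)) (some ((2 * k + 2 : Nat) : Int)) := by
      intro k
      rw [PySem.List.slice_natCast, PySem.List.slice_natCast]
      have hd : (c0 :: c1 :: rest).drop (2 * (k + 1)) = rest.drop (2 * k) := by
        have h21 : 2 * (k + 1) = (2 * k) + 1 + 1 := by omega
        rw [h21]; rfl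
      have h2 : 2 * (k + 1) + 2 - 2 * (k + 1) = 2 := by omega
      have h2' : 2 * k + 2 - 2 * k = 2 := by omega
      rw [hd, h2, h2']
    rw [hlen, htake, List.range_succ_eq_map]
    simp only [List.foldl_cons, List.foldl_map, List.take_succ_cons, pvToBytes, hslice0, hshift]
    rw [ih]
    have hp : pvParseHex [c0, c1] = 16 * pvHexDigitVal c0 + pvHexDigitVal c1 := by
      simp [pvParseHex, List.foldl]
    rw [hp]
  | case2 l h1 =>
    intro acc
    cases l with
    | nil => simp [pvToBytes]
    | cons c t =>
      cases t with
      | nil => simp [pvToBytes]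
      | cons c1 t1 => exact absurd rfl (h1 c c1 t1)

-- XOR-folding the byte list splits into the two nibble XORs (even-length lists)
theorem bytes_split (l : List Char) (hl : l.length % 2 = 0) : ∀ hi lo : Nat, lo < 16 →
    (pvToBytes l).foldl (· ^^^ ·) (16 * hi + lo) = 16 * (hi ^^^ pvXE l) + (lo ^^^ pvXO l) := by
  induction l using pvToBytes.induct with
  | case1 c0 c1 rest ih =>
    intro hi lo hlo
    have hr : rest.length % 2 = 0 := by
      simp only [List.length_cons] at hl; omega
    simp only [pvToBytes, List.foldl_cons]
    rw [nibble_split hi lo (pvHexDigitVal c0) (pvHexDigitVal c1) hlo (pvHexDigitVal_lt c1)]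
    rw [ih hr (hi ^^^ pvHexDigitVal c0) (lo ^^^ pvHexDigitVal c1)
          (Nat.xor_lt_two_pow (n := 4) hlo (pvHexDigitVal_lt c1))]
    rw [pvXE, pvXO, ← Nat.xor_assoc, ← Nat.xor_assoc]
  | case2 l h1 =>
    intro hi lo hlo
    cases l with
    | nil => simp [pvToBytes, pvXE, pvXO]
    | cons c t =>
      cases t with
      | nil => simp only [List.length_cons, List.length_nil] at hl; omega
      | cons c1 t1 => exact absurd rfl (h1 c c1 t1)

-- B's enumerate-parity fold computes the two nibble XORs (even-length lists, even start)
theorem alt_loop (l : List Char) (hl : l.length % 2 = 0) : ∀ (j : Nat) (hi lo : Nat),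
    (PySem.List.enumerate l ((2 * j : Nat) : Int)).foldl
      (fun (st : Nat × Nat) ic =>
        let v := pvHexDigitVal ic.2
        if PySem.Int.mod ic.1 2 == 0 then (st.1 ^^^ v, st.2)
        else (st.1, st.2 ^^^ v)) (hi, lo)
    = (hi ^^^ pvXE l, lo ^^^ pvXO l) := by
  induction l using pvToBytes.induct with
  | case1 c0 c1 rest ih =>
    intro j hi lo
    have hr : rest.length % 2 = 0 := by
      simp only [List.length_cons] at hl; omega
    rw [PySem.List.enumerate_cons, PySem.List.enumerate_cons]
    have heven : (PySem.Int.mod ((2 * j : Nat) : Int) 2 == 0) = true := by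
      simp
    have hodd : (PySem.Int.mod (((2 * j : Nat) : Int) + 1) 2 == 0) = false := by
      have hc : (((2 * j : Nat) : Int) + 1) = ((2 * j + 1 : Nat) : Int) := by push_cast; ring
      rw [hc]
      simp
    have hnext : (((2 * j : Nat) : Int) + 1) + 1 = ((2 * (j + 1) : Nat) : Int) := by push_cast; ring
    simp only [List.foldl_cons, heven, hodd, Bool.false_eq_true, if_true, if_false, hnext]
    rw [ih hr (j + 1)]
    rw [pvXE, pvXO, ← Nat.xor_assoc, ← Nat.xor_assoc]
  | case2 l h1 =>
    intro j hi lo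
    cases l with
    | nil => simp [PySem.List.enumerate_nil, pvXE, pvXO]
    | cons c t =>
      cases t with
      | nil => simp only [List.length_cons, List.length_nil] at hl; omega
      | cons c1 t1 => exact absurd rfl (h1 c c1 t1)

-- the two output formattings agree: A prints 16*hi+lo as a padded byte, B nibble by nibble
theorem format_eq (hi lo : Nat) (hhi : hi < 16) (hlo : lo < 16) :
    (if ('0' :: 'x' :: pvHexRepr (16 * hi + lo)).length ≠ 4
      then String.ofList ('0' :: ('0' :: 'x' :: pvHexRepr (16 * hi + lo)).drop 2)
      else String.ofList (('0' :: 'x' :: pvHexRepr (16 * hi + lo)).drop 2))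
    = String.ofList (pvHexRepr hi ++ pvHexRepr lo) := by
  by_cases h : hi = 0
  · subst h
    have hx : 16 * 0 + lo = lo := by omega
    rw [hx]
    rw [pvHexRepr, if_pos hlo]
    rw [show pvHexRepr 0 = ['0'] from by rw [pvHexRepr]; simp [pvHexChar]]
    simp
  · have hge : ¬ (16 * hi + lo < 16) := by omega
    conv_lhs => rw [pvHexRepr]
    rw [if_neg hge]
    have hdiv : (16 * hi + lo) / 16 = hi := by omega
    have hmod : (16 * hi + lo) % 16 = lo := by omega
    rw [hdiv, hmod]
    conv_lhs => rw [pvHexRepr, if_pos hhi]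
    conv_rhs => rw [show pvHexRepr hi = [pvHexChar hi] from by rw [pvHexRepr, if_pos hhi],
                    show pvHexRepr lo = [pvHexChar lo] from by rw [pvHexRepr, if_pos hlo]]
    simp

-- ===== VERDICT (by name: the statement is the Claim_ definition above) =====
theorem BCC_Check_spec : Claim_equal_BCC_Check := by
  unfold Claim_equal_BCC_Check
  intro data _ _
  unfold Spec_BCC_Check BCC_Check BCC_Check_alt
  dsimp only
  rw [loop_eq]
  set s := PySem.Chars.replace data.toList [' '] [] with hs
  have hm : s.length - s.length % 2 ≤ s.length := by omega
  have hlen : (s.take (s.length - s.length % 2)).length % 2 = 0 := by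
    rw [List.length_take, Nat.min_eq_left hm]; omega
  have hb := bytes_split (s.take (s.length - s.length % 2)) hlen 0 0 (by omega)
  rw [show 16 * 0 + 0 = 0 from rfl] at hb
  rw [hb]
  have ha := alt_loop (s.take (s.length - s.length % 2)) hlen 0 0 0
  rw [show ((2 * 0 : Nat) : Int) = 0 from by norm_num] at ha
  rw [ha]
  simp only [Nat.zero_xor]
  exact format_eq _ _ (pvXE_lt _) (pvXO_lt _)
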